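-- pv_equiv track=rewrite | github.com/TrueSightDAO/dao_client | truesight_dao_client/modules/update_store.py | _store_key_from_shop
-- ===== SOURCE A (Python) =====
-- def _store_key_from_shop(shop_name: str, address: str, city: str, state: str) -> str:
--     """Mirror the DApp's ``createStoreKey_`` (lowercase, hyphenate, double-underscore-separated)
--     so the GAS scanner sees the same key the existing DApp pages produce.
--     Used purely for the optional Store Key column on the audit row; not load-bearing
--     for the actual update_status (which keys on shop_name)."""
--     def slug(s: str) -> str:
--         s = (s or "").strip().lower()
--         if not s:
--             return ""
--         # Lowercase ASCII, replace non-alnum with hyphens, collapse multiples.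
--         out = []
--         prev_dash = False
--         for ch in s:
--             if ch.isalnum():
--                 out.append(ch)
--                 prev_dash = False
--             elif not prev_dash:
--                 out.append("-")
--                 prev_dash = True
--         return "".join(out).strip("-")
--
--     parts = [slug(shop_name), slug(address), slug(city), slug(state)]
--     parts = [p for p in parts if p]
--     return "__".join(parts)
-- ===== SOURCE B (Python) =====
-- def _store_key_from_shop(shop_name: str, address: str, city: str, state: str) -> str:
--     # Two-phase slug: map every char to itself or '-', then collapse dash runs
--     # by zipping with the shifted string, then strip edge dashes.
--     def slug(s: str) -> str:
--         s = (s or "").strip().lower()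
--         mapped = "".join(c if c.isalnum() else "-" for c in s)
--         collapsed = "".join(c for c, p in zip(mapped, "-" + mapped) if c != "-" or p != "-")
--         return collapsed.strip("-")
--     return "__".join(p for p in (slug(f) for f in (shop_name, address, city, state)) if p)
-- ===== Notes on version B (the rewrite author's own statement) =====
-- stated objective: idiomatic
-- what changed: Replaced the one-pass prev_dash state machine in slug with a two-phase generate-then-normalize pipeline: map every char to itself-or-'-', then collapse dash runs by zipping the mapped string with its shifted copy, then strip edge dashes.
import Mathlib
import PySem

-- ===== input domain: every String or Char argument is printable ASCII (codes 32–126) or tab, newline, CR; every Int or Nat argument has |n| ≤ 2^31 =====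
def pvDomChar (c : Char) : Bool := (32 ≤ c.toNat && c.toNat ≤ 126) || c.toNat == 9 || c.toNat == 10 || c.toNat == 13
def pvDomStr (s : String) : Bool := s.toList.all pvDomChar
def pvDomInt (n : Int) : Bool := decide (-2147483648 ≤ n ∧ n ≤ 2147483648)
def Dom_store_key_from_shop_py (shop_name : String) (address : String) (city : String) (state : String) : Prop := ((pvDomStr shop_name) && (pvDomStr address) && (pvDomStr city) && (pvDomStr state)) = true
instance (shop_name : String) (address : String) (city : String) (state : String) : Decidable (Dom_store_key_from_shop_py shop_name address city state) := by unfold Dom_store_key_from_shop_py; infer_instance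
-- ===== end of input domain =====

-- B rewrites the one-pass prev_dash state machine as a two-phase pipeline
-- (map each char to itself-or-'-', then collapse dash runs by zipping with the
-- shifted string); return value proved equal on the whole ASCII domain. Objective: idiomatic.

-- ===== PORT A =====
-- A's slug: strip+lower, early "" return, one pass with (out, prev_dash) state, strip('-')
def slugA (s : String) : String :=
  let cs := PySem.Chars.lower (PySem.Chars.strip s.toList)
  if cs = [] then ""
  else
    let st := cs.foldl (fun (acc : List Char × Bool) ch =>
      if PySem.Chars.isalnum ch then (acc.1 ++ [ch], false)
      else if !acc.2 then (acc.1 ++ ['-'], true)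
      else acc) ([], false)
    String.mk (PySem.Chars.stripChars st.1 ['-'])

def store_key_from_shop_py (shop_name : String) (address : String) (city : String) (state : String) : String :=
  let parts := [slugA shop_name, slugA address, slugA city, slugA state]
  let parts := parts.filter (fun p => p ≠ "")
  PySem.Str.join "__" parts

-- ===== PORT B =====
-- B's slug: map to mapped, collapse by zip with '-' :: mapped, strip('-')
def slugB (s : String) : String :=
  let cs := PySem.Chars.lower (PySem.Chars.strip s.toList)
  let mapped := cs.map (fun c => if PySem.Chars.isalnum c then c else '-')
  let collapsed := ((mapped.zip ('-' :: mapped)).filter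
      (fun cp => cp.1 ≠ '-' || cp.2 ≠ '-')).map Prod.fst
  String.mk (PySem.Chars.stripChars collapsed ['-'])

def store_key_from_shop_py_alt (shop_name : String) (address : String) (city : String) (state : String) : String :=
  let parts := ([shop_name, address, city, state].map slugB).filter (fun p => p ≠ "")
  PySem.Str.join "__" parts

-- ===== PRECONDITION & SPEC =====
def Spec_store_key_from_shop_py (shop_name : String) (address : String) (city : String) (state : String) (out : String) : Prop := out = store_key_from_shop_py_alt shop_name address city state
instance (shop_name : String) (address : String) (city : String) (state : String) (out : String) : Decidable (Spec_store_key_from_shop_py shop_name address city state out) := by unfold Spec_store_key_from_shop_py; infer_instance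

-- ===== CLAIM (what is proved, stated in full; the proofs are below) =====
def Claim_equal_store_key_from_shop_py : Prop := ∀ (shop_name : String) (address : String) (city : String) (state : String), Dom_store_key_from_shop_py shop_name address city state → Spec_store_key_from_shop_py shop_name address city state (store_key_from_shop_py shop_name address city state)

-- ===== LEMMAS AND PROOFS =====

-- reference dash-collapser: prev = "previous emitted char was a dash"
def ded : Bool → List Char → List Char
  | _, [] => []
  | prev, c :: t =>
    if c = '-' then (if prev then ded true t else '-' :: ded true t)
    else c :: ded false t

theorem isalnum_dash : PySem.Chars.isalnum '-' = false := by decide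

theorem foldA_eq_ded (cs : List Char) : ∀ (acc : List Char) (prev : Bool),
    (cs.foldl (fun (acc : List Char × Bool) ch =>
      if PySem.Chars.isalnum ch then (acc.1 ++ [ch], false)
      else if !acc.2 then (acc.1 ++ ['-'], true)
      else acc) (acc, prev)).1
    = acc ++ ded prev (cs.map (fun c => if PySem.Chars.isalnum c then c else '-')) := by
  induction cs with
  | nil => intro acc prev; simp [ded]
  | cons c t ih =>
    intro acc prev
    simp only [Bool.not_eq_true'] at ih
    by_cases h : PySem.Chars.isalnum c = true
    · have hc : c ≠ '-' := by intro e; rw [e] at h; simp [isalnum_dash] at h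
      simp [List.foldl_cons, h, ih, ded, hc]
    · simp only [Bool.not_eq_true] at h
      cases prev with
      | false => simp [List.foldl_cons, h, ih, ded]
      | true => simp [List.foldl_cons, h, ih, ded]

theorem zipB_eq_ded (l : List Char) : ∀ (p : Char),
    ((l.zip (p :: l)).filter (fun cp => cp.1 ≠ '-' || cp.2 ≠ '-')).map Prod.fst
    = ded (p = '-') l := by
  induction l with
  | nil => intro p; simp [ded]
  | cons c t ih =>
    intro p
    simp only [ne_eq, decide_not] at ih
    by_cases hc : c = '-'
    · by_cases hp : p = '-'
      · simp [List.zip_cons_cons, hc, hp, List.filter_cons, ih, ded]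
      · simp [List.zip_cons_cons, hc, hp, List.filter_cons, ih, ded]
    · simp [List.zip_cons_cons, hc, List.filter_cons, ih, ded]

theorem stripChars_ded (l : List Char) :
    PySem.Chars.stripChars (ded false l) ['-'] = PySem.Chars.stripChars (ded true l) ['-'] := by
  cases l with
  | nil => rfl
  | cons c t =>
    by_cases hc : c = '-'
    · simp [ded, hc, PySem.Chars.stripChars, List.dropWhile]
    · simp [ded, hc]

theorem slugA_eq_slugB (s : String) : slugA s = slugB s := by
  unfold slugA slugB
  set cs := PySem.Chars.lower (PySem.Chars.strip s.toList) with hcs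
  by_cases h : cs = []
  · simp only [h, if_true, List.map_nil, List.zip_nil_right, List.filter_nil, List.map_nil]
    rfl
  · simp only [h, if_false]
    rw [foldA_eq_ded, zipB_eq_ded]
    simp [stripChars_ded]

-- ===== VERDICT (by name: the statement is the Claim_ definition above) =====
theorem store_key_from_shop_py_spec : Claim_equal_store_key_from_shop_py := by
  intro sn ad ci st _
  unfold Spec_store_key_from_shop_py store_key_from_shop_py store_key_from_shop_py_alt
  simp [slugA_eq_slugB]
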